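-- pv_equiv track=rewrite | github.com/keisukee/atcoder | ABC197/contestE.py | joinRange
-- ===== SOURCE A (Python) =====
-- def joinRange(balls):
--     joinedRange = []
--     locL, color = balls[0]
--     locR = locL
--     idx = 1
--     while idx < len(balls):
--         while idx < len(balls) and color == balls[idx][1]:
--             locR = balls[idx][0]
--             idx += 1
--         joinedRange.append([locL, locR])
--         if idx >= len(balls):
--             break
--         locL, color = balls[idx]
--         locR = locL
--     return joinedRange
-- ===== SOURCE B (Python) =====
-- def joinRange(balls):
--     out = []
--     last_color = None
--     for loc, color in balls:
--         if out and color == last_color: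
--             out[-1][1] = loc
--         else:
--             out.append([loc, loc])
--             last_color = color
--     return out
-- ===== Notes on version B (the rewrite author's own statement) =====
-- stated objective: simpler
-- what changed: Replaces the manual index cursor with nested while-loops and pending locL/locR/color state by a single flat for-loop that appends a fresh [loc,loc] range on a color change and otherwise updates the right end of the last appended range in place.
-- intended difference: On single-element input A returns [] because its outer loop body never runs and the seeded pending range is never appended, while B returns [[loc, loc]], the intended one-element range. — e.g. on joinRange([[5, 3]]): A returns [], B returns [[5, 5]]
-- outside the precondition, e.g. on joinRange([]): A raises IndexError, B returns []; on joinRange([[1, 2], [3, 2, 9]]): A returns [[1, 3]], B raises ValueError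
import Mathlib
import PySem

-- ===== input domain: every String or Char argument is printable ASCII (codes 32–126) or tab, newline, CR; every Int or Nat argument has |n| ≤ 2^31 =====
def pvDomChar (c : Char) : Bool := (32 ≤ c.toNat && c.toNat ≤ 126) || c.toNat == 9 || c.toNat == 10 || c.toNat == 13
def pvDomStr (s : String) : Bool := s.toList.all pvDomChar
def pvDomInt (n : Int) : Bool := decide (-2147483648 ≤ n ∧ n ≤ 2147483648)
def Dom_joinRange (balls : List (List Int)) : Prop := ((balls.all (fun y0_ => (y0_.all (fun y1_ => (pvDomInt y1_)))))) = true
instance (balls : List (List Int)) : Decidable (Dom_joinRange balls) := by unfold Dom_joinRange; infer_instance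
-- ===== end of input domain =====

-- B replaces A's index cursor and nested while-loops by one flat loop that extends or appends the last range (simpler; same cost).


-- ===== PORT A =====
-- inner 'while idx < len(balls) and color == balls[idx][1]'
def innerA (balls : List (List Int)) (idx : Nat) (locR color : Int) : Nat × Int :=
  if _h : idx < balls.length ∧ color = (balls.getD idx []).getD 1 0 then
    innerA balls (idx + 1) ((balls.getD idx []).getD 0 0) color
  else (idx, locR)
termination_by balls.length - idx
decreasing_by omega

-- outer 'while idx < len(balls)'; fuel-guarded recursion (fuel = len+1 always suffices, proved below)
def outerA (fuel : Nat) (balls : List (List Int)) (idx : Nat) (locL locR color : Int)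
    (acc : List (List Int)) : List (List Int) :=
  match fuel with
  | 0 => acc
  | fuel + 1 =>
    if idx < balls.length then
      let p := innerA balls idx locR color
      let acc' := acc ++ [[locL, p.2]]
      if balls.length ≤ p.1 then acc'
      else
        match balls.getD p.1 [] with
        | [l, c] => outerA fuel balls p.1 l l c acc'
        | _ => acc'  -- Python raises ValueError on unpack here (outside Pre_)
    else acc

def joinRange (balls : List (List Int)) : List (List Int) :=
  match balls with
  | [] => []  -- Python raises IndexError on balls[0] (outside Pre_)
  | b0 :: _ =>
    match b0 with
    | [locL, color] => outerA (balls.length + 1) balls 1 locL locL color []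
    | _ => []  -- Python raises ValueError on unpack (outside Pre_)

-- ===== PORT B =====
-- 'out[-1][1] = loc'
def setLastSnd (out : List (List Int)) (loc : Int) : List (List Int) :=
  match out with
  | [] => []
  | [r] => [[r.getD 0 0, loc]]
  | h :: t => h :: setLastSnd t loc

-- one iteration of B's flat for-loop; state = (out, last_color)
def altStep (st : List (List Int) × Option Int) (b : List Int) : List (List Int) × Option Int :=
  match b with
  | [loc, color] =>
    if st.1 ≠ [] ∧ st.2 = some color then (setLastSnd st.1 loc, st.2)
    else (st.1 ++ [[loc, loc]], some color)
  | _ => st  -- Python raises ValueError on unpack (outside Pre_)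

def joinRange_alt (balls : List (List Int)) : List (List Int) :=
  (balls.foldl altStep ([], none)).1

-- ===== PRECONDITION & SPEC =====
-- Pre_ excludes the empty list (A raises IndexError on balls[0]) and lists containing an element whose
-- length is not 2: on such elements A raises ValueError/IndexError when they start a group, and B's
-- unpacking 'for loc, color in balls' raises ValueError on every such element.
def Pre_joinRange (balls : List (List Int)) : Prop :=
  balls ≠ [] ∧ ∀ b ∈ balls, b.length = 2
instance (balls : List (List Int)) : Decidable (Pre_joinRange balls) := by
  unfold Pre_joinRange; infer_instance

def pvWitness_joinRange : List (List Int) := [[1, 2], [3, 4]]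

-- On single-element input A returns [] (its outer loop body never runs, the seeded pending range is
-- never appended); B returns [[loc, loc]], the intended one-element range.
def D_joinRange (balls : List (List Int)) : Prop := balls.length = 1
instance (balls : List (List Int)) : Decidable (D_joinRange balls) := by
  unfold D_joinRange; infer_instance

def Spec_joinRange (balls : List (List Int)) (out : List (List Int)) : Prop :=
  ¬ D_joinRange balls → out = joinRange_alt balls
instance (balls : List (List Int)) (out : List (List Int)) : Decidable (Spec_joinRange balls out) := by
  unfold Spec_joinRange; infer_instance

def pvDiffWitness_joinRange : List (List Int) := [[5, 3]]
def pvDiffWitnessOut_joinRange : (List (List Int)) × (List (List Int)) := ([], [[5, 5]])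

-- ===== CLAIM (what is proved, stated in full; the proofs are below) =====
def Claim_unchanged_joinRange : Prop := ∀ (balls : List (List Int)), Dom_joinRange balls → Pre_joinRange balls → Spec_joinRange balls (joinRange balls)
def Claim_changed_joinRange : Prop := Dom_joinRange (pvDiffWitness_joinRange) ∧ Pre_joinRange (pvDiffWitness_joinRange) ∧ D_joinRange (pvDiffWitness_joinRange) ∧ joinRange (pvDiffWitness_joinRange) = pvDiffWitnessOut_joinRange.1 ∧ joinRange_alt (pvDiffWitness_joinRange) = pvDiffWitnessOut_joinRange.2 ∧ pvDiffWitnessOut_joinRange.1 ≠ pvDiffWitnessOut_joinRange.2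
def Claim_exact_joinRange : Prop := ∀ (balls : List (List Int)), Dom_joinRange balls → Pre_joinRange balls → D_joinRange balls → joinRange balls ≠ joinRange_alt balls

-- ===== LEMMAS AND PROOFS =====

theorem len2_shape (b : List Int) (h : b.length = 2) : ∃ l c : Int, b = [l, c] := by
  match b with
  | [l, c] => exact ⟨l, c, rfl⟩

theorem setLastSnd_append (acc : List (List Int)) (a bv l : Int) :
    setLastSnd (acc ++ [[a, bv]]) l = acc ++ [[a, l]] := by
  induction acc with
  | nil => simp [setLastSnd, List.getD]
  | cons h t ih =>
    cases t with
    | nil => simp [setLastSnd, List.getD]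
    | cons h2 t2 => simp [setLastSnd] at ih ⊢; exact ih

theorem inner_le (balls : List (List Int)) (idx : Nat) (locR color : Int) :
    idx ≤ (innerA balls idx locR color).1 := by
  fun_induction innerA with
  | case1 idx locR h ih => omega
  | case2 => simp

theorem inner_bound (balls : List (List Int)) (idx : Nat) (locR color : Int)
    (h : idx ≤ balls.length) : (innerA balls idx locR color).1 ≤ balls.length := by
  fun_induction innerA with
  | case1 idx locR h ih => exact ih (by omega)
  | case2 idx locR h => simpa using h

theorem inner_stop (balls : List (List Int)) (idx : Nat) (locR color : Int) :
    ¬ ((innerA balls idx locR color).1 < balls.length ∧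
       color = (balls.getD (innerA balls idx locR color).1 []).getD 1 0) := by
  fun_induction innerA with
  | case1 idx locR h ih => exact ih
  | case2 idx locR h => simpa using h

theorem inner_advance (balls : List (List Int)) (idx : Nat) (locR color : Int)
    (h1 : idx < balls.length) (h2 : color = (balls.getD idx []).getD 1 0) :
    idx + 1 ≤ (innerA balls idx locR color).1 := by
  rw [innerA]
  rw [dif_pos ⟨h1, h2⟩]
  exact inner_le _ _ _ _

-- the fold over the run that innerA consumes
theorem inner_fold (balls : List (List Int)) (hP : ∀ b ∈ balls, b.length = 2)
    (idx : Nat) (locL locR color : Int) (acc : List (List Int)) :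
    (List.foldl altStep (acc ++ [[locL, locR]], some color) (balls.drop idx)).1 =
    (List.foldl altStep (acc ++ [[locL, (innerA balls idx locR color).2]], some color)
      (balls.drop (innerA balls idx locR color).1)).1 := by
  fun_induction innerA with
  | case1 idx locR h ih =>
    obtain ⟨hlt, hc⟩ := h
    have hdrop : balls.drop idx = balls[idx] :: balls.drop (idx + 1) :=
      List.drop_eq_getElem_cons hlt
    have hmem : balls[idx] ∈ balls := List.getElem_mem hlt
    obtain ⟨l, c, hlc⟩ := len2_shape _ (hP _ hmem)
    have hgetD : balls.getD idx [] = balls[idx] := List.getD_eq_getElem balls [] hlt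
    rw [hdrop, hlc]
    have hc' : color = c := by
      rw [hgetD, hlc] at hc; simpa [List.getD] using hc
    have hl : (balls.getD idx []).getD 0 0 = l := by rw [hgetD, hlc]; simp [List.getD]
    rw [List.foldl_cons]
    have hstep : altStep (acc ++ [[locL, locR]], some color) [l, c] =
        (acc ++ [[locL, l]], some color) := by
      simp [altStep, hc', setLastSnd_append]
    rw [hstep]
    rw [hl] at ih ⊢
    exact ih
  | case2 => rfl

theorem outer_fold (balls : List (List Int)) (hP : ∀ b ∈ balls, b.length = 2) :
    ∀ (fuel idx : Nat) (locL locR color : Int) (acc : List (List Int)),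
    idx < balls.length →
    (balls.length - idx < fuel ∨
      (color = (balls.getD idx []).getD 1 0 ∧ balls.length - idx = fuel)) →
    outerA fuel balls idx locL locR color acc =
      (List.foldl altStep (acc ++ [[locL, locR]], some color) (balls.drop idx)).1 := by
  intro fuel
  induction fuel with
  | zero => intro idx locL locR color acc hidx hf; omega
  | succ fuel ih =>
    intro idx locL locR color acc hidx hf
    rw [outerA, if_pos hidx]
    rw [inner_fold balls hP idx locL locR color acc]
    set p := innerA balls idx locR color with hp
    have hle : idx ≤ p.1 := inner_le _ _ _ _
    have hbnd : p.1 ≤ balls.length := inner_bound _ _ _ _ (by omega)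
    have hstop := inner_stop balls idx locR color
    by_cases hend : balls.length ≤ p.1
    · rw [if_pos hend]
      have : balls.drop p.1 = [] := List.drop_eq_nil_of_le hend
      rw [this]; rfl
    · rw [if_neg hend]
      push Not at hend
      have hmem : balls[p.1] ∈ balls := List.getElem_mem hend
      obtain ⟨l, c, hlc⟩ := len2_shape _ (hP _ hmem)
      have hgetD : balls.getD p.1 [] = balls[p.1] := List.getD_eq_getElem balls [] hend
      rw [hgetD, hlc]
      have hcne : c ≠ color := by
        intro hcc
        exact hstop ⟨hend, by rw [← hp, hgetD, hlc]; simp [List.getD, hcc]⟩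
      -- fold consumes balls[p.1] : color changes, new range [l, l] appended
      have hdrop : balls.drop p.1 = balls[p.1] :: balls.drop (p.1 + 1) :=
        List.drop_eq_getElem_cons hend
      have hstep : altStep (acc ++ [[locL, p.2]], some color) [l, c] =
          ((acc ++ [[locL, p.2]]) ++ [[l, l]], some c) := by
        simp [altStep]
        intro h; exact absurd h.symm hcne
      -- next entry state satisfies the color-match invariant when p.1+1 < len? no: invariant is on idx = p.1
      have hmatch : c = (balls.getD p.1 []).getD 1 0 := by
        rw [hgetD, hlc]; simp [List.getD]
      have hle2 : balls.length - p.1 ≤ fuel := by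
        rcases hf with h1 | h2
        · omega
        · have hadv : idx + 1 ≤ p.1 := inner_advance balls idx locR color hidx h2.1
          omega
      have hfuel' : balls.length - p.1 < fuel ∨
          (c = (balls.getD p.1 []).getD 1 0 ∧ balls.length - p.1 = fuel) := by
        rcases Nat.lt_or_ge (balls.length - p.1) fuel with h | h
        · exact Or.inl h
        · exact Or.inr ⟨hmatch, by omega⟩
      have hstep2 : altStep (acc ++ [[locL, p.2]] ++ [[l, l]], some c) [l, c] =
          (acc ++ [[locL, p.2]] ++ [[l, l]], some c) := by
        simp only [altStep, List.append_assoc, List.cons_append, List.nil_append]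
        have h := setLastSnd_append (acc ++ [[locL, p.2]]) l l l
        simp only [List.append_assoc, List.cons_append, List.nil_append] at h
        simp [h]
      change outerA fuel balls p.1 l l c (acc ++ [[locL, p.2]]) = _
      rw [ih p.1 l l c (acc ++ [[locL, p.2]]) hend hfuel']
      rw [hdrop, hlc, List.foldl_cons, hstep2, List.foldl_cons, hstep]

-- ===== VERDICT (by name: the statement is the Claim_ definition above) =====
theorem joinRange_spec : Claim_unchanged_joinRange := by
  intro balls _hDom hPre hND
  obtain ⟨hne, hP⟩ := hPre
  match balls, hne with
  | b0 :: rest, _ =>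
    obtain ⟨l0, c0, h0⟩ := len2_shape b0 (hP b0 (by simp))
    subst h0
    have hlen : 1 < ([l0, c0] :: rest).length := by
      have : ([l0, c0] :: rest).length ≠ 1 := fun h => hND h
      simp only [List.length_cons] at this ⊢
      omega
    show joinRange ([l0, c0] :: rest) = joinRange_alt ([l0, c0] :: rest)
    rw [joinRange, joinRange_alt]
    rw [List.foldl_cons]
    have hfirst : altStep ([], none) [l0, c0] = ([[l0, l0]], some c0) := by
      simp [altStep]
    rw [hfirst]
    have hrest : rest = (([l0, c0] :: rest).drop 1) := rfl
    rw [outer_fold ([l0, c0] :: rest) hP (([l0, c0] :: rest).length + 1) 1 l0 l0 c0 []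
      hlen (Or.inl (by omega))]
    rw [hrest]
    rfl

theorem joinRange_changed : Claim_changed_joinRange := by
  unfold Claim_changed_joinRange; decide

theorem joinRange_tight : Claim_exact_joinRange := by
  intro balls _hDom hPre hD
  obtain ⟨hne, hP⟩ := hPre
  match balls with
  | [b0] =>
    obtain ⟨l0, c0, h0⟩ := len2_shape b0 (hP b0 (by simp))
    subst h0
    simp [joinRange, joinRange_alt, outerA, altStep]
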